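-- pv_equiv track=rewrite | github.com/unworthyzeus/midi-to-vsqx | channel_analyzer.py | _group_by_channel
-- ===== SOURCE A (Python) =====
-- from typing import List, Dict, Tuple, Any
--
-- def _group_by_channel(notes: List[Dict]) -> Dict[int, List[Dict]]:
--     """Group notes by MIDI channel"""
--     channels = {}
--     for note in notes:
--         ch = note.get('channel', 0)
--         if ch not in channels:
--             channels[ch] = []
--         channels[ch].append(note)
--
--     # Sort each channel by start time
--     for ch in channels:
--         channels[ch].sort(key=lambda n: n['start'])
--
--     return channels
-- ===== SOURCE B (Python) =====
-- def _group_by_channel(notes):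
--     """Group notes by MIDI channel: list the distinct channels in first-appearance
--     order, then build the result directly with one filter+sort per channel
--     (no incremental dict of growing lists)."""
--     chans = list(dict.fromkeys(n.get('channel', 0) for n in notes))
--     return {c: sorted((n for n in notes if n.get('channel', 0) == c),
--                       key=lambda n: n['start'])
--             for c in chans}
-- ===== Notes on version B (the rewrite author's own statement) =====
-- stated objective: alternative
-- what changed: A builds a dict incrementally (append each note to its channel's growing list) and then sorts each channel list in a second mutating loop; B never builds intermediate dict state: it lists the distinct channels in first-appearance order and constructs the result in one comprehension, filtering and sorting the notes of each channel directly.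
import Mathlib
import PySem

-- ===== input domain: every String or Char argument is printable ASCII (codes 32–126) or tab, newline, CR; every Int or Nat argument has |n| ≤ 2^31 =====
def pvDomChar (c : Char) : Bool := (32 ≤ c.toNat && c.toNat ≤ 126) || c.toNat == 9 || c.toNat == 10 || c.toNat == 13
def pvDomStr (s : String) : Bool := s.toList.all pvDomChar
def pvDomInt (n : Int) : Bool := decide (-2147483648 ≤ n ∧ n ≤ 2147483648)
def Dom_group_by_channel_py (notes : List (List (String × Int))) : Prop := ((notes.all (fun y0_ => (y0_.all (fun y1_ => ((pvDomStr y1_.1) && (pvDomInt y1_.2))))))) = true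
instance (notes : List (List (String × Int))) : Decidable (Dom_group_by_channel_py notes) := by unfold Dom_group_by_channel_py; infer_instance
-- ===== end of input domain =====

-- B replaces A's incremental dict-of-growing-lists (then a second per-channel sort loop) by a
-- direct construction: distinct channels in first-appearance order, one filter+sort per channel
-- (objective: alternative — no intermediate mutable dict state).

-- ===== PORT A =====
-- note.get('channel', 0)
def pvChan (note : List (String × Int)) : Int := (PySem.Dict.mk note).getD "channel" 0
-- n['start'] — the raising lookup; exact on Pre_ (every note carries a 'start' key)
def pvStart (note : List (String × Int)) : Int := (PySem.Dict.mk note).getD "start" 0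

def group_by_channel_py (notes : List (List (String × Int))) : List (Int × List (List (String × Int))) :=
  -- channels = {}; for note in notes: ch = note.get('channel',0); if ch not in channels: channels[ch]=[]; channels[ch].append(note)
  -- ('default to [] if absent, then append' is Dict.modify ch [] (· ++ [note]))
  let channels : PySem.Dict Int (List (List (String × Int))) :=
    notes.foldl (fun d note => d.modify (pvChan note) [] (fun l => l ++ [note])) PySem.Dict.empty
  -- for ch in channels: channels[ch].sort(key=lambda n: n['start'])
  let channels2 :=
    channels.keys.foldl (fun d ch => d.modify ch [] (fun l => PySem.List.sorted l pvStart false)) channels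
  channels2.items

-- ===== PORT B =====
def group_by_channel_py_alt (notes : List (List (String × Int))) : List (Int × List (List (String × Int))) :=
  -- chans = list(dict.fromkeys(n.get('channel',0) for n in notes))
  let chans := PySem.List.dedup (notes.map pvChan)
  -- {c: sorted((n for n in notes if n.get('channel',0) == c), key=lambda n: n['start']) for c in chans}
  chans.map (fun c => (c, PySem.List.sorted (notes.filter (fun n => pvChan n == c)) pvStart false))

-- ===== PRECONDITION & SPEC =====
-- Pre_ excludes exactly the inputs with a note lacking a 'start' key: there Python A raises KeyError in the sort.
def Pre_group_by_channel_py (notes : List (List (String × Int))) : Prop :=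
  (notes.all (fun note => note.any (fun kv => kv.1 == "start"))) = true
instance (notes : List (List (String × Int))) : Decidable (Pre_group_by_channel_py notes) := by
  unfold Pre_group_by_channel_py; infer_instance

def pvWitness_group_by_channel_py : (List (List (String × Int))) :=
  [[("channel", 1), ("start", 3)], [("start", 0)]]

def Spec_group_by_channel_py (notes : List (List (String × Int))) (out : List (Int × List (List (String × Int)))) : Prop := out = group_by_channel_py_alt notes
instance (notes : List (List (String × Int))) (out : List (Int × List (List (String × Int)))) : Decidable (Spec_group_by_channel_py notes out) := by unfold Spec_group_by_channel_py; infer_instance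

-- ===== CLAIM (what is proved, stated in full; the proofs are below) =====
def Claim_equal_group_by_channel_py : Prop := ∀ (notes : List (List (String × Int))), Dom_group_by_channel_py notes → Pre_group_by_channel_py notes → Spec_group_by_channel_py notes (group_by_channel_py notes)

-- ===== LEMMAS AND PROOFS =====

-- Set.update adds nothing when every element is already present
theorem set_update_self {s : PySem.Set Int} {xs : List Int} (h : ∀ x ∈ xs, x ∈ s) :
    PySem.Set.update s xs = s := by
  induction xs generalizing s with
  | nil => rfl
  | cons x xs ih =>
      have hm : x ∈ s := h x (by simp)
      show PySem.Set.update (PySem.Set.add s x) xs = s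
      rw [show PySem.Set.add s x = s by simp [PySem.Set.add, hm]]
      exact ih (fun y hy => h y (by simp [hy]))

-- the grouping fold: value at c is the old value plus the notes of channel c, in order
theorem getD_group_fold (notes : List (List (String × Int)))
    (d : PySem.Dict Int (List (List (String × Int)))) (c : Int) :
    (notes.foldl (fun d note => d.modify (pvChan note) [] (fun l => l ++ [note])) d).getD c []
      = d.getD c [] ++ notes.filter (fun n => pvChan n == c) := by
  induction notes generalizing d with
  | nil => simp
  | cons n ns ih =>
      simp only [List.foldl_cons, ih, List.filter_cons]
      rw [PySem.Dict.getD_modify]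
      by_cases hc : c = pvChan n
      · simp [hc]
      · have hne : (pvChan n == c) = false := by simpa using fun h => hc h.symm
        simp [hc, hne]

-- the per-key sorting fold over a Nodup key list
theorem getD_sort_fold (K : List Int) (hK : K.Nodup)
    (d : PySem.Dict Int (List (List (String × Int)))) (c : Int) :
    (K.foldl (fun d ch => d.modify ch [] (fun l => PySem.List.sorted l pvStart false)) d).getD c []
      = if c ∈ K then PySem.List.sorted (d.getD c []) pvStart false else d.getD c [] := by
  induction K generalizing d with
  | nil => simp
  | cons k K ih =>
      simp only [List.foldl_cons]
      rw [ih hK.of_cons]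
      by_cases hc : c = k
      · subst hc
        have hnm : c ∉ K := by simpa using (List.nodup_cons.mp hK).1
        simp [hnm]
      · rw [PySem.Dict.getD_modify]
        simp [hc, List.mem_cons]

-- A's result in closed form: exactly B's direct construction
theorem A_items (notes : List (List (String × Int))) :
    group_by_channel_py notes
      = (PySem.Set.ofList (notes.map pvChan)).map
          (fun c => (c, PySem.List.sorted (notes.filter (fun n => pvChan n == c)) pvStart false)) := by
  unfold group_by_channel_py
  have hk1 : (notes.foldl (fun d note => d.modify (pvChan note) [] (fun l => l ++ [note]))
      (PySem.Dict.empty : PySem.Dict Int (List (List (String × Int))))).keys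
      = PySem.Set.ofList (notes.map pvChan) := by
    rw [PySem.Dict.keys_foldl_modify_key notes pvChan [] (fun _ note l => l ++ [note]) PySem.Dict.empty,
        PySem.Dict.keys_empty, PySem.Set.update_nil_left]
  set channels := notes.foldl (fun d note => d.modify (pvChan note) [] (fun l => l ++ [note]))
      (PySem.Dict.empty : PySem.Dict Int (List (List (String × Int)))) with hch
  have hg1 : ∀ c, channels.getD c [] = notes.filter (fun n => pvChan n == c) := by
    intro c; rw [hch, getD_group_fold, PySem.Dict.getD_empty]; simp
  have hnd : channels.keys.Nodup := by rw [hk1]; exact PySem.Set.nodup_ofList _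
  set channels2 := channels.keys.foldl
      (fun d ch => d.modify ch [] (fun l => PySem.List.sorted l pvStart false)) channels with hch2
  have hk2 : channels2.keys = channels.keys := by
    rw [hch2, PySem.Dict.keys_foldl_modify channels.keys [] (fun _ _ l => PySem.List.sorted l pvStart false) channels]
    exact set_update_self (fun x hx => hx)
  have hg2 : ∀ c, channels2.getD c []
      = PySem.List.sorted (notes.filter (fun n => pvChan n == c)) pvStart false := by
    intro c
    rw [hch2, getD_sort_fold channels.keys hnd channels c, hg1]
    by_cases hm : c ∈ channels.keys
    · simp [hm]
    · have hf : notes.filter (fun n => pvChan n == c) = [] := by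
        refine List.filter_eq_nil_iff.mpr (fun n hn => ?_)
        intro hcn
        exact hm (by
          rw [hk1, PySem.Set.mem_ofList]
          exact List.mem_map.mpr ⟨n, hn, by simpa using hcn⟩)
      rw [if_neg hm, hf, eq_comm, PySem.List.sorted_eq_nil_iff]
  have hnd2 : channels2.keys.Nodup := by rw [hk2]; exact hnd
  rw [PySem.Dict.items_eq_map_keys channels2 hnd2 [], hk2, hk1]
  exact List.map_congr_left (fun c _ => by rw [hg2 c])

-- ===== VERDICT (by name: the statement is the Claim_ definition above) =====
theorem group_by_channel_py_spec : Claim_equal_group_by_channel_py := by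
  intro notes _ _
  show group_by_channel_py notes = group_by_channel_py_alt notes
  rw [A_items]
  simp [group_by_channel_py_alt]
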